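-- pv_equiv track=rewrite | github.com/Kalpesh1Sharma/shl-reco-engine | retrieval/rank_utils.py | balanced_rerank
-- ===== SOURCE A (Python) =====
-- from collections import defaultdict
--
-- def categorize_assessment(test_type: str):
--     """
--     Map raw test type text into high-level categories
--     """
--     if not test_type:
--         return "other"
--
--     t = test_type.lower()
--
--     if "cognitive" in t or "ability" in t or "aptitude" in t:
--         return "cognitive"
--     if "personality" in t or "behavior" in t:
--         return "personality"
--     if "skill" in t or "knowledge" in t or "technical" in t:
--         return "skills"
--
--     return "other"
--
-- def balanced_rerank(candidates, top_k=10):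
--     """
--     Ensure diversity across assessment categories
--     """
--     buckets = defaultdict(list)
--
--     for item in candidates:
--         category = categorize_assessment(item.get("test_type", ""))
--         buckets[category].append(item)
--
--     final = []
--
--     # Priority order preferred by SHL
--     priority = ["skills", "cognitive", "personality", "other"]
--
--     while len(final) < top_k:
--         added = False
--         for p in priority:
--             if buckets[p]:
--                 final.append(buckets[p].pop(0))
--                 added = True
--                 if len(final) == top_k:
--                     break
--         if not added:
--             break
--
--     return final
-- ===== SOURCE B (Python) =====
-- def categorize_assessment(test_type: str):
--     """
--     Map raw test type text into high-level categories
--     """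
--     if not test_type:
--         return "other"
--
--     t = test_type.lower()
--
--     if "cognitive" in t or "ability" in t or "aptitude" in t:
--         return "cognitive"
--     if "personality" in t or "behavior" in t:
--         return "personality"
--     if "skill" in t or "knowledge" in t or "technical" in t:
--         return "skills"
--
--     return "other"
--
--
-- def balanced_rerank(candidates, top_k=10):
--     # One pass: tag each candidate with a sort key 4*position_in_its_bucket + priority_rank,
--     # then one stable sort + slice reproduces the round-robin interleaving.
--     rank = {"skills": 0, "cognitive": 1, "personality": 2, "other": 3}
--     counts = {c: 0 for c in rank}
--     keyed = []
--     for item in candidates: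
--         cat = categorize_assessment(item.get("test_type", ""))
--         keyed.append((4 * counts[cat] + rank[cat], item))
--         counts[cat] += 1
--     keyed.sort(key=lambda t: t[0])
--     return [item for _, item in keyed[:max(top_k, 0)]]
-- ===== Notes on version B (the rewrite author's own statement) =====
-- stated objective: alternative
-- what changed: Replaces the bucket-popping round-robin while-loop by a single pass that tags each candidate with the integer key 4*position_in_its_bucket + priority_rank, followed by one stable sort and a slice of the first max(top_k,0) items.
import Mathlib
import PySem

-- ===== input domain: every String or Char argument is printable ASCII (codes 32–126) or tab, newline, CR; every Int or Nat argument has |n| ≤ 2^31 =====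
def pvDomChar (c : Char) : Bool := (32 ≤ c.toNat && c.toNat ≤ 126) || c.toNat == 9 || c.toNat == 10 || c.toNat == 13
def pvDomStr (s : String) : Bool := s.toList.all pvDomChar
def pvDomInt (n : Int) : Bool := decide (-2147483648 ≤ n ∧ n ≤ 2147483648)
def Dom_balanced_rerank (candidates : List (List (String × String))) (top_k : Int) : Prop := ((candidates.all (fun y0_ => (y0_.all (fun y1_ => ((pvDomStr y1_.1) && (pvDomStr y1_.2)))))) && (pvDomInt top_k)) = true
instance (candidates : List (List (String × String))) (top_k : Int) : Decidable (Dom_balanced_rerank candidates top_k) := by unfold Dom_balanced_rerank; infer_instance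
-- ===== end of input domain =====

-- B replaces A's bucket-popping round-robin while-loop by a one-pass integer keying
-- (4*position_in_bucket + priority_rank) followed by one stable sort and a slice (alternative decomposition).
-- A mutates its local buckets only; neither version mutates its arguments.


-- ===== PORT A =====
-- shared helper: categorize_assessment (identical in Source A and Source B)
def categorize_assessment (test_type : String) : String :=
  if test_type = "" then "other"
  else
    let t := PySem.Str.lower test_type
    if PySem.Str.isIn "cognitive" t || PySem.Str.isIn "ability" t || PySem.Str.isIn "aptitude" t then "cognitive"
    else if PySem.Str.isIn "personality" t || PySem.Str.isIn "behavior" t then "personality"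
    else if PySem.Str.isIn "skill" t || PySem.Str.isIn "knowledge" t || PySem.Str.isIn "technical" t then "skills"
    else "other"

-- item.get("test_type", "") on the dict item
def catOf (item : List (String × String)) : String :=
  categorize_assessment ((PySem.Dict.mk item).getD "test_type" "")

def priorityA : List String := ["skills", "cognitive", "personality", "other"]

-- buckets[category].append(item) over all candidates (defaultdict(list))
def buildBuckets (candidates : List (List (String × String))) :
    PySem.Dict String (List (List (String × String))) :=
  candidates.foldl
    (fun b item =>
      let category := catOf item
      b.insert category ((b.getD category []) ++ [item]))
    PySem.Dict.empty

-- the inner `for p in priority:` with its two breaks; returns (buckets, final, added);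
-- third component true = `added` was set (and when final hits top_k we stop immediately)
def innerFor (ps : List String) (b : PySem.Dict String (List (List (String × String))))
    (final : List (List (String × String))) (added : Bool) (top_k : Int) :
    PySem.Dict String (List (List (String × String))) × List (List (String × String)) × Bool :=
  match ps with
  | [] => (b, final, added)
  | p :: rest =>
    match h : b.getD p [] with
    | [] => innerFor rest b final added top_k
    | x :: xs =>
      let b' := b.insert p xs
      let final' := final ++ [x]
      if (final'.length : Int) = top_k then (b', final', true)
      else innerFor rest b' final' true top_k

-- the `while len(final) < top_k:` loop; fuel = candidates-count + 1 outer iterations always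
-- suffices (each non-final iteration appends at least one item), so this is a totality guard only
def whileLoop (fuel : Nat) (b : PySem.Dict String (List (List (String × String))))
    (final : List (List (String × String))) (top_k : Int) : List (List (String × String)) :=
  match fuel with
  | 0 => final
  | fuel + 1 =>
    if (final.length : Int) < top_k then
      let r := innerFor priorityA b final false top_k
      if r.2.2 then whileLoop fuel r.1 r.2.1 top_k else r.2.1
    else final

def balanced_rerank (candidates : List (List (String × String))) (top_k : Int) :
    List (List (String × String)) :=
  let buckets := buildBuckets candidates
  whileLoop (candidates.length + 1) buckets [] top_k

-- ===== PORT B =====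
def rankB : PySem.Dict String Int :=
  (((PySem.Dict.empty.insert "skills" 0).insert "cognitive" 1).insert "personality" 2).insert "other" 3

-- counts = {c: 0 for c in rank}
def countsInit : PySem.Dict String Int :=
  rankB.keys.foldl (fun d c => d.insert c 0) PySem.Dict.empty

-- the tagging loop: state (counts, keyed)
def tagStep (st : PySem.Dict String Int × List (Int × List (String × String)))
    (item : List (String × String)) :
    PySem.Dict String Int × List (Int × List (String × String)) :=
  let cat := catOf item
  (st.1.insert cat (st.1.getD cat 0 + 1),
   st.2 ++ [(4 * st.1.getD cat 0 + rankB.getD cat 0, item)])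

def balanced_rerank_alt (candidates : List (List (String × String))) (top_k : Int) :
    List (List (String × String)) :=
  let st := candidates.foldl tagStep (countsInit, [])
  let sortedKeyed := PySem.List.sorted st.2 (fun t => t.1) false
  (sortedKeyed.take (max top_k 0).toNat).map (fun t => t.2)

-- ===== PRECONDITION & SPEC =====
def Spec_balanced_rerank (candidates : List (List (String × String))) (top_k : Int) (out : List (List (String × String))) : Prop := out = balanced_rerank_alt candidates top_k
instance (candidates : List (List (String × String))) (top_k : Int) (out : List (List (String × String))) : Decidable (Spec_balanced_rerank candidates top_k out) := by unfold Spec_balanced_rerank; infer_instance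

-- ===== CLAIM (what is proved, stated in full; the proofs are below) =====
def Claim_equal_balanced_rerank : Prop := ∀ (candidates : List (List (String × String))) (top_k : Int), Dom_balanced_rerank candidates top_k → Spec_balanced_rerank candidates top_k (balanced_rerank candidates top_k)

-- ===== LEMMAS AND PROOFS =====

-- full round-robin interleaving of four buckets (proof-side abstraction)
def rrList {α : Type} (s c p o : List α) : List α :=
  if s.length + c.length + p.length + o.length = 0 then []
  else (s.take 1 ++ c.take 1 ++ p.take 1 ++ o.take 1) ++ rrList s.tail c.tail p.tail o.tail
termination_by s.length + c.length + p.length + o.length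
decreasing_by
  rename_i h
  simp only [List.length_tail]
  omega

-- bucket keyed with positions n, n+1, … and priority rank r
def keyedL {α : Type} (r : Int) (n : Nat) : List α → List (Int × α)
  | [] => []
  | x :: xs => (4 * (n : Int) + r, x) :: keyedL r (n + 1) xs

-- category of an item, filtered bucket
def filt (c : String) (l : List (List (String × String))) : List (List (String × String)) :=
  l.filter (fun it => catOf it == c)

-- multiset shuffle used for round-robin permutation bookkeeping
theorem perm_shuffle {α : Type} (a b c d e f g h : List α) :
    ((a ++ b ++ c ++ d) ++ (e ++ f ++ g ++ h)).Perm ((a ++ e) ++ (b ++ f) ++ (c ++ g) ++ (d ++ h)) := by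
  rw [← Multiset.coe_eq_coe]
  show ((a : Multiset α) + b + c + d) + (e + f + g + h) = (a + e) + (b + f) + (c + g) + (d + h)
  abel

theorem take1_append_tail {α : Type} (l : List α) : l.take 1 ++ l.tail = l := by
  cases l <;> simp

theorem rrList_perm {α : Type} (s c p o : List α) :
    (rrList s c p o).Perm (s ++ c ++ p ++ o) := by
  fun_induction rrList with
  | case1 s c p o h =>
    have hs : s = [] := by simpa using (by omega : s.length = 0)
    have hc : c = [] := by simpa using (by omega : c.length = 0)
    have hp : p = [] := by simpa using (by omega : p.length = 0)
    have ho : o = [] := by simpa using (by omega : o.length = 0)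
    simp [hs, hc, hp, ho]
  | case2 s c p o h ih =>
    have h1 := ih.append_left (s.take 1 ++ c.take 1 ++ p.take 1 ++ o.take 1)
    have h2 := perm_shuffle (s.take 1) (c.take 1) (p.take 1) (o.take 1) s.tail c.tail p.tail o.tail
    have h4 : (s.take 1 ++ s.tail) ++ (c.take 1 ++ c.tail) ++ (p.take 1 ++ p.tail) ++ (o.take 1 ++ o.tail)
        = s ++ c ++ p ++ o := by
      rw [take1_append_tail, take1_append_tail, take1_append_tail, take1_append_tail]
    exact h1.trans (h4 ▸ h2)


theorem rrList_map {α β : Type} (f : α → β) (s c p o : List α) :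
    (rrList s c p o).map f = rrList (s.map f) (c.map f) (p.map f) (o.map f) := by
  fun_induction rrList s c p o with
  | case1 s c p o h =>
    have hs : s = [] := by simpa using (by omega : s.length = 0)
    have hc : c = [] := by simpa using (by omega : c.length = 0)
    have hp : p = [] := by simpa using (by omega : p.length = 0)
    have ho : o = [] := by simpa using (by omega : o.length = 0)
    simp [hs, hc, hp, ho, rrList]
  | case2 s c p o h ih =>
    have hne : ¬((s.map f).length + (c.map f).length + (p.map f).length + (o.map f).length = 0) := by
      simpa using h
    conv_rhs => rw [rrList]
    simp only [if_neg hne]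
    simp [ih, List.map_take, List.map_tail]

theorem keyedL_length {α : Type} (r : Int) (n : Nat) (l : List α) :
    (keyedL r n l).length = l.length := by
  induction l generalizing n with
  | nil => rfl
  | cons x xs ih => simp [keyedL, ih]

theorem keyedL_map_snd {α : Type} (r : Int) (n : Nat) (l : List α) :
    (keyedL r n l).map (fun y => y.2) = l := by
  induction l generalizing n with
  | nil => rfl
  | cons x xs ih => simp [keyedL, ih]

theorem keyedL_tail {α : Type} (r : Int) (n : Nat) (l : List α) :
    (keyedL r n l).tail = keyedL r (n + 1) l.tail := by
  cases l <;> simp [keyedL]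

theorem keyedL_append {α : Type} (r : Int) (n : Nat) (l : List α) (x : α) :
    keyedL r n (l ++ [x]) = keyedL r n l ++ [(4 * ((n : Int) + l.length) + r, x)] := by
  induction l generalizing n with
  | nil => simp [keyedL]
  | cons y ys ih => simp [keyedL, ih]; ring_nf

theorem take1_keyed_key {α : Type} (r : Int) (n : Nat) (l : List α) :
    ∀ y ∈ (keyedL r n l).take 1, y.1 = 4 * (n : Int) + r := by
  cases l <;> simp [keyedL]

theorem heads_pairwise {α : Type} (n : Nat) (S C P O : List α) :
    ((keyedL 0 n S).take 1 ++ (keyedL 1 n C).take 1 ++ (keyedL 2 n P).take 1 ++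
      (keyedL 3 n O).take 1).Pairwise (fun a b : Int × α => a.1 < b.1) := by
  rcases S with _ | ⟨a, S⟩ <;> rcases C with _ | ⟨b, C⟩ <;> rcases P with _ | ⟨c, P⟩ <;>
    rcases O with _ | ⟨d, O⟩ <;> simp [keyedL, List.pairwise_cons] <;> omega

theorem rrList_keyed {α : Type} (N : Nat) : ∀ (n : Nat) (S C P O : List α),
    S.length + C.length + P.length + O.length ≤ N →
    (∀ y ∈ rrList (keyedL 0 n S) (keyedL 1 n C) (keyedL 2 n P) (keyedL 3 n O), 4 * (n : Int) ≤ y.1) ∧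
    (rrList (keyedL 0 n S) (keyedL 1 n C) (keyedL 2 n P) (keyedL 3 n O)).Pairwise (fun a b => a.1 < b.1) := by
  induction N with
  | zero =>
    intro n S C P O hlen
    have hS : S = [] := by simpa using (by omega : S.length = 0)
    have hC : C = [] := by simpa using (by omega : C.length = 0)
    have hP : P = [] := by simpa using (by omega : P.length = 0)
    have hO : O = [] := by simpa using (by omega : O.length = 0)
    subst hS; subst hC; subst hP; subst hO
    simp [keyedL, rrList]
  | succ N ih =>
    intro n S C P O hlen
    by_cases hz : S.length + C.length + P.length + O.length = 0
    · have hS : S = [] := by simpa using (by omega : S.length = 0)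
      have hC : C = [] := by simpa using (by omega : C.length = 0)
      have hP : P = [] := by simpa using (by omega : P.length = 0)
      have hO : O = [] := by simpa using (by omega : O.length = 0)
      subst hS; subst hC; subst hP; subst hO
      simp [keyedL, rrList]
    · have hcond : ¬((keyedL 0 n S).length + (keyedL 1 n C).length + (keyedL 2 n P).length +
          (keyedL (3 : Int) n O).length = 0) := by
        simpa [keyedL_length] using hz
      rw [rrList, if_neg hcond]
      simp only [keyedL_tail]
      obtain ⟨ihb, ihp⟩ := ih (n + 1) S.tail C.tail P.tail O.tail
        (by simp only [List.length_tail]; omega)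
      have hheads : ∀ y ∈ (keyedL 0 n S).take 1 ++ (keyedL 1 n C).take 1 ++
          (keyedL 2 n P).take 1 ++ (keyedL (3 : Int) n O).take 1,
          4 * (n : Int) ≤ y.1 ∧ y.1 ≤ 4 * (n : Int) + 3 := by
        intro y hy
        simp only [List.mem_append] at hy
        rcases hy with ((h | h) | h) | h
        · have := take1_keyed_key 0 n S y h; omega
        · have := take1_keyed_key 1 n C y h; omega
        · have := take1_keyed_key 2 n P y h; omega
        · have := take1_keyed_key 3 n O y h; omega
      constructor
      · intro y hy
        rcases List.mem_append.1 hy with h | h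
        · exact (hheads y h).1
        · have := ihb y h; push_cast at this ⊢; omega
      · refine List.pairwise_append.2 ⟨heads_pairwise n S C P O, ihp, ?_⟩
        intro a ha b hb
        have h1 := (hheads a ha).2
        have h2 := ihb b hb
        push_cast at h2
        omega

-- ===== A-side loop characterisation =====
def headsOf (ps : List String) (d : PySem.Dict String (List (List (String × String)))) :
    List (List (String × String)) :=
  ps.flatMap (fun p => (d.getD p []).take 1)

def pop1 (d : PySem.Dict String (List (List (String × String)))) (p : String) :
    PySem.Dict String (List (List (String × String))) :=
  match d.getD p [] with
  | [] => d
  | _ :: xs => d.insert p xs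

def popAll (ps : List String) (d : PySem.Dict String (List (List (String × String)))) :
    PySem.Dict String (List (List (String × String))) :=
  ps.foldl pop1 d

theorem headsOf_congr (ps : List String) (d d' : PySem.Dict String (List (List (String × String))))
    (h : ∀ q ∈ ps, d.getD q [] = d'.getD q []) : headsOf ps d = headsOf ps d' := by
  induction ps with
  | nil => rfl
  | cons p rest ih =>
    simp only [headsOf, List.flatMap_cons] at *
    rw [h p (by simp), ih (fun q hq => h q (by simp [hq]))]

theorem popAll_getD (ps : List String) (hnd : ps.Nodup)
    (d : PySem.Dict String (List (List (String × String)))) (q : String) :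
    (popAll ps d).getD q [] = if q ∈ ps then (d.getD q []).tail else d.getD q [] := by
  induction ps generalizing d with
  | nil => simp [popAll]
  | cons p rest ih =>
    have hnr : rest.Nodup := hnd.of_cons
    have hpn : p ∉ rest := (List.nodup_cons.1 hnd).1
    have hstep : popAll (p :: rest) d = popAll rest (pop1 d p) := rfl
    rw [hstep, ih hnr]
    by_cases hqp : q = p
    · subst hqp
      simp only [if_neg (by exact fun h => hpn h), List.mem_cons, true_or, if_pos]
      unfold pop1
      cases h : d.getD q [] with
      | nil => simp [h]
      | cons x xs => simp [PySem.Dict.getD_insert, h]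
    · have hq1 : (pop1 d p).getD q [] = d.getD q [] := by
        unfold pop1
        cases h : d.getD p [] with
        | nil => rfl
        | cons x xs =>
          simp only [PySem.Dict.getD_insert]
          rw [if_neg hqp]
      rw [hq1]
      simp [List.mem_cons, hqp]

theorem innerFor_spec (ps : List String) (hnd : ps.Nodup)
    (d : PySem.Dict String (List (List (String × String))))
    (final : List (List (String × String))) (added : Bool) (tk : Int)
    (hlt : (final.length : Int) < tk) :
    if tk ≤ (final.length : Int) + (headsOf ps d).length then
      (innerFor ps d final added tk).2.1 = final ++ (headsOf ps d).take (tk - final.length).toNat ∧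
      (innerFor ps d final added tk).2.2 = true
    else
      innerFor ps d final added tk = (popAll ps d, final ++ headsOf ps d, added || !(headsOf ps d).isEmpty) := by
  induction ps generalizing d final added with
  | nil =>
    rw [if_neg (by simp [headsOf]; omega)]
    simp [innerFor, headsOf, popAll]
  | cons p rest ih =>
    have hnr : rest.Nodup := hnd.of_cons
    have hpn : p ∉ rest := (List.nodup_cons.1 hnd).1
    cases hd : d.getD p [] with
    | nil =>
      have hif : innerFor (p :: rest) d final added tk = innerFor rest d final added tk := by
        rw [innerFor]; rw [hd]
      have hh : headsOf (p :: rest) d = headsOf rest d := by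
        simp [headsOf, hd]
      have hp1 : pop1 d p = d := by unfold pop1; rw [hd]
      have hpa : popAll (p :: rest) d = popAll rest d := by
        show popAll rest (pop1 d p) = popAll rest d
        rw [hp1]
      rw [hif, hh, hpa]
      exact ih hnr d final added hlt
    | cons x xs =>
      have hb' : ∀ q ∈ rest, d.getD q [] = (d.insert p xs).getD q [] := by
        intro q hq
        have : ¬q = p := fun h => hpn (h ▸ hq)
        simp [PySem.Dict.getD_insert, this]
      have hh : headsOf (p :: rest) d = x :: headsOf rest (d.insert p xs) := by
        have h0 := headsOf_congr rest d (d.insert p xs) hb'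
        simp only [headsOf] at h0 ⊢
        rw [List.flatMap_cons, hd, h0]
        rfl
      have hpa : popAll (p :: rest) d = popAll rest (d.insert p xs) := by
        show popAll rest (pop1 d p) = _
        unfold pop1; rw [hd]
      have hif : innerFor (p :: rest) d final added tk =
          (if ((final ++ [x]).length : Int) = tk then (d.insert p xs, final ++ [x], true)
           else innerFor rest (d.insert p xs) (final ++ [x]) true tk) := by
        rw [innerFor]; rw [hd]
      by_cases hstop : ((final ++ [x]).length : Int) = tk
      · have hlen : tk ≤ (final.length : Int) + (headsOf (p :: rest) d).length := by
          rw [hh]; simp at hstop ⊢; omega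
        rw [if_pos hlen, hif, if_pos hstop]
        constructor
        · simp only [hh]
          have h1 : (tk - final.length).toNat = 1 := by simp at hstop; omega
          rw [h1]
          simp
        · rfl
      · have hrec := ih hnr (d.insert p xs) (final ++ [x]) true
          (by simp at hstop ⊢; omega)
        rw [hif, if_neg hstop]
        by_cases hcase : tk ≤ (final.length : Int) + (headsOf (p :: rest) d).length
        · rw [if_pos hcase]
          have hcase' : tk ≤ ((final ++ [x]).length : Int) + (headsOf rest (d.insert p xs)).length := by
            rw [hh] at hcase; simp at hcase ⊢; omega
          rw [if_pos hcase'] at hrec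
          obtain ⟨h1, h2⟩ := hrec
          refine ⟨?_, h2⟩
          rw [h1, hh]
          have ht : (tk - final.length).toNat = (tk - ((final ++ [x]).length : Int)).toNat + 1 := by
            simp; omega
          rw [ht]
          simp
        · rw [if_neg hcase]
          have hcase' : ¬(tk ≤ ((final ++ [x]).length : Int) + (headsOf rest (d.insert p xs)).length) := by
            rw [hh] at hcase; simp at hcase ⊢; omega
          rw [if_neg hcase'] at hrec
          rw [hrec, hpa, hh]
          simp

theorem whileLoop_spec (N : Nat) : ∀ (d : PySem.Dict String (List (List (String × String))))
    (final : List (List (String × String))) (tk : Int),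
    (d.getD "skills" []).length + (d.getD "cognitive" []).length +
      (d.getD "personality" []).length + (d.getD "other" []).length < N →
    whileLoop N d final tk =
      final ++ (rrList (d.getD "skills" []) (d.getD "cognitive" []) (d.getD "personality" [])
        (d.getD "other" [])).take (tk - final.length).toNat := by
  induction N with
  | zero => intro d final tk htot; omega
  | succ N ih =>
    intro d final tk htot
    by_cases hlt : (final.length : Int) < tk
    · have hnd : priorityA.Nodup := by decide
      have hspec := innerFor_spec priorityA hnd d final false tk hlt
      have hhs : headsOf priorityA d = (d.getD "skills" []).take 1 ++ (d.getD "cognitive" []).take 1 ++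
          (d.getD "personality" []).take 1 ++ (d.getD "other" []).take 1 := by
        simp [headsOf, priorityA]
      rw [whileLoop]
      rw [if_pos hlt]
      simp only []
      by_cases hcase : tk ≤ (final.length : Int) + (headsOf priorityA d).length
      · rw [if_pos hcase] at hspec
        obtain ⟨h1, h2⟩ := hspec
        rw [h2, h1]
        have hlen1 : (tk - (final.length : Int)).toNat ≤ (headsOf priorityA d).length := by omega
        have hflen : ((final ++ (headsOf priorityA d).take (tk - final.length).toNat).length : Int) = tk := by
          simp only [List.length_append, List.length_take]
          push_cast
          omega
        have hstop : whileLoop N (innerFor priorityA d final false tk).1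
            (final ++ (headsOf priorityA d).take (tk - final.length).toNat) tk =
            final ++ (headsOf priorityA d).take (tk - final.length).toNat := by
          cases N with
          | zero => rfl
          | succ M => rw [whileLoop, if_neg (by omega)]
        rw [hstop]
        have hne : ¬((d.getD "skills" []).length + (d.getD "cognitive" []).length +
            (d.getD "personality" []).length + (d.getD "other" []).length = 0) := by
          intro h0
          have e1 : d.getD "skills" [] = [] := by
            have : (d.getD "skills" []).length = 0 := by omega
            simpa using this
          have e2 : d.getD "cognitive" [] = [] := by
            have : (d.getD "cognitive" []).length = 0 := by omega
            simpa using this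
          have e3 : d.getD "personality" [] = [] := by
            have : (d.getD "personality" []).length = 0 := by omega
            simpa using this
          have e4 : d.getD "other" [] = [] := by
            have : (d.getD "other" []).length = 0 := by omega
            simpa using this
          rw [e1, e2, e3, e4] at hhs
          simp at hhs
          rw [hhs] at hcase
          simp at hcase
          omega
        rw [rrList, if_neg hne, ← hhs]
        rw [List.take_append_of_le_length hlen1]
        simp
      · rw [if_neg hcase] at hspec
        rw [hspec]
        by_cases hemp : (headsOf priorityA d).isEmpty
        · simp only [hemp, Bool.not_true, Bool.or_false, if_neg (Bool.false_ne_true)]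
          have hhe : headsOf priorityA d = [] := List.isEmpty_iff.1 hemp
          rw [hhe] at hhs
          have e1 : (d.getD "skills" []).take 1 = [] := by
            rcases List.append_eq_nil_iff.1 (List.append_eq_nil_iff.1 (List.append_eq_nil_iff.1 hhs.symm).1).1 with ⟨h, _⟩
            exact h
          have hS : d.getD "skills" [] = [] := by cases h : d.getD "skills" [] <;> simp [h] at e1 ⊢
          have e2 : (d.getD "cognitive" []).take 1 = [] := by
            rcases List.append_eq_nil_iff.1 (List.append_eq_nil_iff.1 (List.append_eq_nil_iff.1 hhs.symm).1).1 with ⟨_, h⟩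
            exact h
          have hC : d.getD "cognitive" [] = [] := by cases h : d.getD "cognitive" [] <;> simp [h] at e2 ⊢
          have e3 : (d.getD "personality" []).take 1 = [] := by
            rcases List.append_eq_nil_iff.1 (List.append_eq_nil_iff.1 hhs.symm).1 with ⟨_, h⟩
            exact h
          have hP : d.getD "personality" [] = [] := by cases h : d.getD "personality" [] <;> simp [h] at e3 ⊢
          have e4 : (d.getD "other" []).take 1 = [] := by
            rcases List.append_eq_nil_iff.1 hhs.symm with ⟨_, h⟩
            exact h
          have hO : d.getD "other" [] = [] := by cases h : d.getD "other" [] <;> simp [h] at e4 ⊢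
          rw [hS, hC, hP, hO]
          simp [rrList, hhe]
        · have hemp' : (!(headsOf priorityA d).isEmpty) = true := by simp [hemp]
          simp only [hemp', Bool.or_true, if_pos rfl]
          have hq : ∀ q, q ∈ priorityA → (popAll priorityA d).getD q [] = (d.getD q []).tail := by
            intro q hq
            rw [popAll_getD priorityA hnd d q, if_pos hq]
          have hS := hq "skills" (by decide)
          have hC := hq "cognitive" (by decide)
          have hP := hq "personality" (by decide)
          have hO := hq "other" (by decide)
          have hone : 1 ≤ (d.getD "skills" []).length + (d.getD "cognitive" []).length +
              (d.getD "personality" []).length + (d.getD "other" []).length := by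
            by_contra h0
            have e1 : d.getD "skills" [] = [] := by
              have : (d.getD "skills" []).length = 0 := by omega
              simpa using this
            have e2 : d.getD "cognitive" [] = [] := by
              have : (d.getD "cognitive" []).length = 0 := by omega
              simpa using this
            have e3 : d.getD "personality" [] = [] := by
              have : (d.getD "personality" []).length = 0 := by omega
              simpa using this
            have e4 : d.getD "other" [] = [] := by
              have : (d.getD "other" []).length = 0 := by omega
              simpa using this
            rw [e1, e2, e3, e4] at hhs
            simp at hhs
            exact hemp (by simp [hhs])
          have hrec := ih (popAll priorityA d) (final ++ headsOf priorityA d) tk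
            (by rw [hS, hC, hP, hO]; simp only [List.length_tail]; omega)
          rw [hrec, hS, hC, hP, hO]
          have hne : ¬((d.getD "skills" []).length + (d.getD "cognitive" []).length +
              (d.getD "personality" []).length + (d.getD "other" []).length = 0) := by omega
          conv_rhs => rw [rrList, if_neg hne]
          rw [← hhs]
          have hgt : (headsOf priorityA d).length ≤ (tk - (final.length : Int)).toNat := by omega
          rw [List.take_append]
          rw [List.take_of_length_le hgt]
          have harith : (tk - ((final ++ headsOf priorityA d).length : Int)).toNat =
              (tk - (final.length : Int)).toNat - (headsOf priorityA d).length := by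
            simp only [List.length_append]
            push_cast
            omega
          rw [harith]
          simp [List.append_assoc]
    · rw [whileLoop, if_neg hlt]
      have : (tk - (final.length : Int)).toNat = 0 := by omega
      rw [this]
      simp

theorem catOf_mem (it : List (String × String)) :
    catOf it = "skills" ∨ catOf it = "cognitive" ∨ catOf it = "personality" ∨ catOf it = "other" := by
  simp only [catOf, categorize_assessment]
  split_ifs <;> simp

theorem buildBuckets_getD (candidates : List (List (String × String))) (s : String) :
    (buildBuckets candidates).getD s [] = filt s candidates := by
  induction candidates using List.reverseRecOn with
  | nil => simp [buildBuckets, filt]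
  | append_singleton pre it ih =>
    unfold buildBuckets at ih ⊢
    rw [List.foldl_append]
    simp only [List.foldl_cons, List.foldl_nil]
    by_cases hs : s = catOf it
    · subst hs
      simp [PySem.Dict.getD_insert, ih, filt, List.filter_append]
    · simp only [PySem.Dict.getD_insert]
      rw [if_neg hs, ih]
      simp [filt, List.filter_append,
        (by simpa using fun h => hs h.symm : (catOf it == s) = false)]

theorem filt_length_sum (l : List (List (String × String))) :
    (filt "skills" l).length + (filt "cognitive" l).length +
      (filt "personality" l).length + (filt "other" l).length = l.length := by
  induction l with
  | nil => simp [filt]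
  | cons x xs ih =>
    rcases catOf_mem x with h | h | h | h <;>
      simp only [filt, List.filter_cons] at * <;> rw [h] <;> simp <;> omega

-- ===== B-side fold characterisation =====
theorem countsInit_getD (c : String) : countsInit.getD c 0 = 0 := by
  have hk : rankB.keys = ["skills", "cognitive", "personality", "other"] := by rfl
  simp only [countsInit, hk, List.foldl_cons, List.foldl_nil]
  simp only [PySem.Dict.getD_insert]
  split_ifs <;> rfl

theorem rankB_getD_vals : rankB.getD "skills" 0 = 0 ∧ rankB.getD "cognitive" 0 = 1 ∧
    rankB.getD "personality" 0 = 2 ∧ rankB.getD "other" 0 = 3 := by decide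

theorem tagFold_counts (pre : List (List (String × String))) (c : String) :
    (pre.foldl tagStep (countsInit, [])).1.getD c 0 = ((filt c pre).length : Int) := by
  induction pre using List.reverseRecOn with
  | nil => simp [filt, countsInit_getD]
  | append_singleton pre it ih =>
    rw [List.foldl_append, List.foldl_cons, List.foldl_nil]
    simp only [tagStep, PySem.Dict.getD_insert]
    by_cases hc : c = catOf it
    · subst hc
      rw [if_pos rfl, ih]
      simp [filt, List.filter_append]
    · rw [if_neg hc, ih]
      simp [filt, List.filter_append, (by simpa using fun h => hc h.symm : (catOf it == c) = false)]

theorem tagFold_perm (pre : List (List (String × String))) :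
    (pre.foldl tagStep (countsInit, [])).2.Perm
      (keyedL 0 0 (filt "skills" pre) ++ keyedL 1 0 (filt "cognitive" pre) ++
       keyedL 2 0 (filt "personality" pre) ++ keyedL 3 0 (filt "other" pre)) := by
  induction pre using List.reverseRecOn with
  | nil => simp [filt, keyedL]
  | append_singleton pre it ih =>
    rw [List.foldl_append, List.foldl_cons, List.foldl_nil]
    simp only [tagStep]
    rw [tagFold_counts pre (catOf it)]
    obtain ⟨r0, r1, r2, r3⟩ := rankB_getD_vals
    have hfilt_eq : ∀ c : String, catOf it = c → filt c (pre ++ [it]) = filt c pre ++ [it] := by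
      intro c hc
      simp [filt, List.filter_append, (by simp [hc] : (catOf it == c) = true)]
    have hfilt_ne : ∀ c : String, catOf it ≠ c → filt c (pre ++ [it]) = filt c pre := by
      intro c hc
      simp [filt, List.filter_append, (by simpa using hc : (catOf it == c) = false)]
    have hkey : ∀ (r : Int) (l : List (List (String × String))),
        keyedL r 0 (l ++ [it]) = keyedL r 0 l ++ [(4 * (l.length : Int) + r, it)] := by
      intro r l
      rw [keyedL_append]
      norm_num
    rcases catOf_mem it with hc | hc | hc | hc
    · rw [hc, r0, hfilt_eq "skills" hc, hfilt_ne "cognitive" (by rw [hc]; decide),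
        hfilt_ne "personality" (by rw [hc]; decide), hfilt_ne "other" (by rw [hc]; decide), hkey]
      refine (ih.append_right _).trans ?_
      rw [← Multiset.coe_eq_coe]
      show ((keyedL 0 0 (filt "skills" pre) : Multiset (Int × List (String × String))) +
            ↑(keyedL 1 0 (filt "cognitive" pre)) + ↑(keyedL 2 0 (filt "personality" pre)) +
            ↑(keyedL 3 0 (filt "other" pre))) + ↑[((4 * ((filt "skills" pre).length : Int) + 0, it))] =
          (↑(keyedL 0 0 (filt "skills" pre)) + ↑[((4 * ((filt "skills" pre).length : Int) + 0, it))]) +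
            ↑(keyedL 1 0 (filt "cognitive" pre)) + ↑(keyedL 2 0 (filt "personality" pre)) +
            ↑(keyedL 3 0 (filt "other" pre))
      abel
    · rw [hc, r1, hfilt_eq "cognitive" hc, hfilt_ne "skills" (by rw [hc]; decide),
        hfilt_ne "personality" (by rw [hc]; decide), hfilt_ne "other" (by rw [hc]; decide), hkey]
      refine (ih.append_right _).trans ?_
      rw [← Multiset.coe_eq_coe]
      show ((keyedL 0 0 (filt "skills" pre) : Multiset (Int × List (String × String))) +
            ↑(keyedL 1 0 (filt "cognitive" pre)) + ↑(keyedL 2 0 (filt "personality" pre)) +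
            ↑(keyedL 3 0 (filt "other" pre))) + ↑[((4 * ((filt "cognitive" pre).length : Int) + 1, it))] =
          ↑(keyedL 0 0 (filt "skills" pre)) +
            (↑(keyedL 1 0 (filt "cognitive" pre)) + ↑[((4 * ((filt "cognitive" pre).length : Int) + 1, it))]) +
            ↑(keyedL 2 0 (filt "personality" pre)) + ↑(keyedL 3 0 (filt "other" pre))
      abel
    · rw [hc, r2, hfilt_eq "personality" hc, hfilt_ne "skills" (by rw [hc]; decide),
        hfilt_ne "cognitive" (by rw [hc]; decide), hfilt_ne "other" (by rw [hc]; decide), hkey]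
      refine (ih.append_right _).trans ?_
      rw [← Multiset.coe_eq_coe]
      show ((keyedL 0 0 (filt "skills" pre) : Multiset (Int × List (String × String))) +
            ↑(keyedL 1 0 (filt "cognitive" pre)) + ↑(keyedL 2 0 (filt "personality" pre)) +
            ↑(keyedL 3 0 (filt "other" pre))) + ↑[((4 * ((filt "personality" pre).length : Int) + 2, it))] =
          ↑(keyedL 0 0 (filt "skills" pre)) + ↑(keyedL 1 0 (filt "cognitive" pre)) +
            (↑(keyedL 2 0 (filt "personality" pre)) + ↑[((4 * ((filt "personality" pre).length : Int) + 2, it))]) +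
            ↑(keyedL 3 0 (filt "other" pre))
      abel
    · rw [hc, r3, hfilt_eq "other" hc, hfilt_ne "skills" (by rw [hc]; decide),
        hfilt_ne "cognitive" (by rw [hc]; decide), hfilt_ne "personality" (by rw [hc]; decide), hkey]
      refine (ih.append_right _).trans ?_
      rw [← Multiset.coe_eq_coe]
      show ((keyedL 0 0 (filt "skills" pre) : Multiset (Int × List (String × String))) +
            ↑(keyedL 1 0 (filt "cognitive" pre)) + ↑(keyedL 2 0 (filt "personality" pre)) +
            ↑(keyedL 3 0 (filt "other" pre))) + ↑[((4 * ((filt "other" pre).length : Int) + 3, it))] =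
          ↑(keyedL 0 0 (filt "skills" pre)) + ↑(keyedL 1 0 (filt "cognitive" pre)) +
            ↑(keyedL 2 0 (filt "personality" pre)) +
            (↑(keyedL 3 0 (filt "other" pre)) + ↑[((4 * ((filt "other" pre).length : Int) + 3, it))])
      abel

theorem balanced_rerank_spec : Claim_equal_balanced_rerank := by
  intro candidates top_k _
  unfold Spec_balanced_rerank
  have hA : balanced_rerank candidates top_k =
      (rrList (filt "skills" candidates) (filt "cognitive" candidates)
        (filt "personality" candidates) (filt "other" candidates)).take top_k.toNat := by
    unfold balanced_rerank
    rw [whileLoop_spec (candidates.length + 1) (buildBuckets candidates) [] top_k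
      (by rw [buildBuckets_getD, buildBuckets_getD, buildBuckets_getD, buildBuckets_getD,
            filt_length_sum candidates]; omega)]
    rw [buildBuckets_getD, buildBuckets_getD, buildBuckets_getD, buildBuckets_getD]
    simp
  have hperm : (rrList (keyedL 0 0 (filt "skills" candidates)) (keyedL 1 0 (filt "cognitive" candidates))
      (keyedL 2 0 (filt "personality" candidates)) (keyedL 3 0 (filt "other" candidates))).Perm
      (candidates.foldl tagStep (countsInit, [])).2 :=
    (rrList_perm _ _ _ _).trans (tagFold_perm candidates).symm
  have hpw := (rrList_keyed ((filt "skills" candidates).length + (filt "cognitive" candidates).length +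
      (filt "personality" candidates).length + (filt "other" candidates).length) 0
      (filt "skills" candidates) (filt "cognitive" candidates) (filt "personality" candidates)
      (filt "other" candidates) (le_refl _)).2
  have hsort := PySem.List.sorted_eq_of_perm_of_pairwise_lt
    (candidates.foldl tagStep (countsInit, [])).2
    (rrList (keyedL 0 0 (filt "skills" candidates)) (keyedL 1 0 (filt "cognitive" candidates))
      (keyedL 2 0 (filt "personality" candidates)) (keyedL 3 0 (filt "other" candidates)))
    (fun t => t.1) hperm hpw
  have hB : balanced_rerank_alt candidates top_k =
      (rrList (filt "skills" candidates) (filt "cognitive" candidates)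
        (filt "personality" candidates) (filt "other" candidates)).take top_k.toNat := by
    unfold balanced_rerank_alt
    simp only [hsort]
    have hmax : (max top_k 0).toNat = top_k.toNat := by
      rcases le_total top_k 0 with h | h
      · rw [max_eq_right h]; omega
      · rw [max_eq_left h]
    rw [hmax, List.map_take, rrList_map,
      keyedL_map_snd, keyedL_map_snd, keyedL_map_snd, keyedL_map_snd]
  rw [hA, hB]
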